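-- pv_equiv track=rewrite | github.com/Hunryyy/ocr | eval.py | _would_cycle
-- ===== SOURCE A (Python) =====
-- from typing import Any, Dict, List, Optional, Tuple
--
-- def _would_cycle(u: int, v: int, out_map: Dict[int, Optional[int]]) -> bool:
--     cur = v
--     seen = set()
--     while cur is not None:
--         if cur == u:
--             return True
--         if cur in seen:
--             break
--         seen.add(cur)
--         cur = out_map.get(cur)
--     return False
-- ===== SOURCE B (Python) =====
-- def _would_cycle(u: int, v: int, out_map) -> bool:
--     # Backward closure: saturate the set of all nodes from which u is reachable
--     # (predecessor closure of {u} over the edge list), then test membership of v.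
--     anc = {u}
--     changed = True
--     while changed:
--         changed = False
--         for k, w in out_map.items():
--             if w in anc and k not in anc:
--                 anc.add(k)
--                 changed = True
--     return v in anc
-- ===== Notes on version B (the rewrite author's own statement) =====
-- stated objective: alternative
-- what changed: Instead of walking the successor chain forward from v with a visited set, B computes the set of ALL nodes that reach u by saturating a predecessor closure of {u} over the edge list, then tests v's membership; Pre_ restricts the association list to duplicate-free keys, the only lists a Python dict can denote.
import Mathlib
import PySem

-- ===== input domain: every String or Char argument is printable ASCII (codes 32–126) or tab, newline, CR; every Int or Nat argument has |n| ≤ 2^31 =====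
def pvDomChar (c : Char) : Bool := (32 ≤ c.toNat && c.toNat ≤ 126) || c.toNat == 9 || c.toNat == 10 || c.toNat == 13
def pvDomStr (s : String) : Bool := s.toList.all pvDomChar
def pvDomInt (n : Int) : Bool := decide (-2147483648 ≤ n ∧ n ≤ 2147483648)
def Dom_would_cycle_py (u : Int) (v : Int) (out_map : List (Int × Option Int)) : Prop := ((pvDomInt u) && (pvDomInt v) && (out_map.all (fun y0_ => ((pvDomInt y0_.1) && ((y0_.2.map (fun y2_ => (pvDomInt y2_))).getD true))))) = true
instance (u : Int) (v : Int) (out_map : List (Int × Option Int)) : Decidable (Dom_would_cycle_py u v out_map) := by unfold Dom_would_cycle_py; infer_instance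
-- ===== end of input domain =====

-- B replaces A's forward walk along the successor chain (with a 'seen' set) by a
-- backward saturation: it computes the set of ALL nodes that reach u by closing {u}
-- under predecessors over the edge list, then tests v's membership (alternative algorithm).

-- ===== PORT A =====
-- A's while loop: cur starts at v; stops returning True on u, False on a repeat (seen)
-- or on None.  The loop terminates because each iteration adds a fresh node to 'seen';
-- the fuel out_map.length + 2 is a strict upper bound on the iteration count (proved
-- unreachable in wcA_iff below), so the port computes exactly A's value.
def wcA_loop (u : Int) (out_map : List (Int × Option Int)) :
    Nat → Int → PySem.Set Int → Bool
  | 0, _, _ => false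
  | fuel + 1, cur, seen =>
      if cur = u then true
      else if PySem.Set.contains seen cur then false
      else
        match PySem.Dict.getD (PySem.Dict.mk out_map) cur none with
        | some nxt => wcA_loop u out_map fuel nxt (PySem.Set.add seen cur)
        | none => false

def would_cycle_py (u : Int) (v : Int) (out_map : List (Int × Option Int)) : Bool :=
  wcA_loop u out_map (out_map.length + 2) v PySem.Set.empty

-- ===== PORT B =====
-- one edge (k, w) of the inner 'for k, w in out_map.items()' loop: add k when w ∈ anc
def wcBstep (st : PySem.Set Int × Bool) (p : Int × Option Int) : PySem.Set Int × Bool :=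
  match p.2 with
  | some x =>
      if PySem.Set.contains st.1 x && !PySem.Set.contains st.1 p.1
      then (PySem.Set.add st.1 p.1, true) else st
  | none => st

-- one full pass over the edge list, with its 'changed' flag
def wcBpass (out_map : List (Int × Option Int)) (anc : PySem.Set Int) :
    PySem.Set Int × Bool :=
  out_map.foldl wcBstep (anc, false)

-- the 'while changed' loop; a changing pass adds at least one key of out_map to anc,
-- so out_map.length + 1 passes provably reach the fixpoint (wc_sat_fix below)
def wcBsat (out_map : List (Int × Option Int)) : Nat → PySem.Set Int → PySem.Set Int
  | 0, anc => anc
  | fuel + 1, anc =>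
      let r := wcBpass out_map anc
      if r.2 then wcBsat out_map fuel r.1 else anc

def would_cycle_py_alt (u : Int) (v : Int) (out_map : List (Int × Option Int)) : Bool :=
  PySem.Set.contains (wcBsat out_map (out_map.length + 1) (PySem.Set.ofList [u])) v

-- ===== PRECONDITION & SPEC =====
-- Pre_ requires the association-list keys to be duplicate-free — exactly the lists a
-- Python dict (A's actual parameter type) can denote; duplicate-key lists are artefacts
-- of the dict-as-list encoding, on which first-match lookup vs whole-list scanning differ.
def Pre_would_cycle_py (u : Int) (v : Int) (out_map : List (Int × Option Int)) : Prop :=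
  (out_map.map Prod.fst).Nodup
instance (u : Int) (v : Int) (out_map : List (Int × Option Int)) : Decidable (Pre_would_cycle_py u v out_map) := by unfold Pre_would_cycle_py; infer_instance

def pvWitness_would_cycle_py : Int × Int × (List (Int × Option Int)) :=
  (0, 1, [(1, some 0)])

def Spec_would_cycle_py (u : Int) (v : Int) (out_map : List (Int × Option Int)) (out : Bool) : Prop := out = would_cycle_py_alt u v out_map
instance (u : Int) (v : Int) (out_map : List (Int × Option Int)) (out : Bool) : Decidable (Spec_would_cycle_py u v out_map out) := by unfold Spec_would_cycle_py; infer_instance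

-- ===== CLAIM =====
def Claim_equal_would_cycle_py : Prop := ∀ (u : Int) (v : Int) (out_map : List (Int × Option Int)), Dom_would_cycle_py u v out_map → Pre_would_cycle_py u v out_map → Spec_would_cycle_py u v out_map (would_cycle_py u v out_map)

-- ===== LEMMAS AND PROOFS =====

-- the successor step A's chain takes: None sticks, otherwise out_map.get(cur)
def wcStep (out_map : List (Int × Option Int)) : Option Int → Option Int
  | none => none
  | some c => PySem.Dict.getD (PySem.Dict.mk out_map) c none

-- reachability of u along the successor chain — the meaning both ports compute
def wcReach (u : Int) (m : List (Int × Option Int)) (c : Int) : Prop :=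
  ∃ j, (wcStep m)^[j] (some c) = some u

-- the (finite) universe of values a chain node can take
def wcS (v : Int) (out_map : List (Int × Option Int)) : List Int :=
  v :: out_map.filterMap Prod.snd

theorem wcStep_none (m : List (Int × Option Int)) (j : Nat) :
    (wcStep m)^[j] none = none := by
  induction j with
  | zero => rfl
  | succ j ih => rw [Function.iterate_succ_apply]; exact ih

theorem wc_getD_mem (m : List (Int × Option Int)) (c x : Int)
    (h : PySem.Dict.getD (PySem.Dict.mk m) c none = some x) :
    x ∈ m.filterMap Prod.snd := by
  induction m with
  | nil => simp [PySem.Dict.getD, PySem.Dict.get?] at h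
  | cons p rest ih =>
    rw [PySem.Dict.getD_eq_get?_getD, PySem.Dict.get?_mk_cons] at h
    by_cases hk : p.1 == c
    · simp [hk] at h
      exact List.mem_filterMap.2 ⟨p, List.mem_cons_self, by simp [h]⟩
    · simp [hk] at h
      rw [← PySem.Dict.getD_eq_get?_getD] at h
      have := ih h
      exact List.mem_filterMap.2 (by
        obtain ⟨a, ha, hav⟩ := List.mem_filterMap.1 this
        exact ⟨a, List.mem_cons_of_mem _ ha, hav⟩)

-- first-match lookup returns the value of SOME member pair
theorem wc_getD_pair_mem (m : List (Int × Option Int)) (c x : Int)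
    (h : PySem.Dict.getD (PySem.Dict.mk m) c none = some x) :
    (c, some x) ∈ m := by
  induction m with
  | nil => simp [PySem.Dict.getD, PySem.Dict.get?] at h
  | cons p rest ih =>
    rw [PySem.Dict.getD_eq_get?_getD, PySem.Dict.get?_mk_cons] at h
    by_cases hk : p.1 == c
    · simp only [hk, if_true, Option.getD_some] at h
      have hc : p.1 = c := by simpa using hk
      have : p = (c, some x) := by cases p; simp_all
      rw [← this]; exact List.mem_cons_self
    · simp only [hk, Bool.false_eq_true, if_false] at h
      rw [← PySem.Dict.getD_eq_get?_getD] at h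
      exact List.mem_cons_of_mem _ (ih h)

-- with duplicate-free keys, every member pair IS the lookup result
theorem wc_getD_of_mem (m : List (Int × Option Int)) (k : Int) (w : Option Int)
    (hnd : (m.map Prod.fst).Nodup) (hmem : (k, w) ∈ m) :
    PySem.Dict.getD (PySem.Dict.mk m) k none = w := by
  induction m with
  | nil => simp at hmem
  | cons p rest ih =>
    rw [List.map_cons, List.nodup_cons] at hnd
    rw [PySem.Dict.getD_eq_get?_getD, PySem.Dict.get?_mk_cons]
    rcases List.mem_cons.1 hmem with heq | htail
    · rw [← heq]; simp
    · by_cases hk : p.1 == k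
      · exfalso
        have : p.1 = k := by simpa using hk
        exact hnd.1 (this ▸ List.mem_map.2 ⟨(k, w), htail, rfl⟩)
      · simp only [hk, Bool.false_eq_true, if_false]
        rw [← PySem.Dict.getD_eq_get?_getD]
        exact ih hnd.2 htail

-- once the chain repeats, every later value already occurred before the repeat
theorem wc_period (m : List (Int × Option Int)) (x : Option Int) (i k : Nat)
    (hik : i < k) (heq : (wcStep m)^[k] x = (wcStep m)^[i] x) :
    ∀ j, ∃ j' < k, (wcStep m)^[j'] x = (wcStep m)^[j] x := by
  intro j
  induction j using Nat.strong_induction_on with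
  | _ j ih =>
    by_cases hj : j < k
    · exact ⟨j, hj, rfl⟩
    · obtain ⟨d, rfl⟩ : ∃ d, j = d + k := ⟨j - k, by omega⟩
      have h1 : (wcStep m)^[d + k] x = (wcStep m)^[d + i] x := by
        rw [Function.iterate_add_apply, heq, ← Function.iterate_add_apply]
      have hlt : d + i < d + k := by omega
      obtain ⟨j', hj', hj'eq⟩ := ih (d + i) hlt
      exact ⟨j', hj', by rw [hj'eq, h1]⟩

theorem wc_chain_mem (v : Int) (m : List (Int × Option Int)) (j : Nat) (c : Int)
    (h : (wcStep m)^[j] (some v) = some c) : c ∈ wcS v m := by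
  cases j with
  | zero => simp at h; simp [wcS, h]
  | succ j =>
    rw [Function.iterate_succ_apply'] at h
    cases hprev : (wcStep m)^[j] (some v) with
    | none => rw [hprev] at h; simp [wcStep] at h
    | some c' =>
      rw [hprev] at h
      simp only [wcStep] at h
      exact List.mem_cons_of_mem _ (wc_getD_mem m c' c h)

-- pigeonhole: strictly more distinct chain values than |wcS| is impossible
theorem wc_pigeon (v : Int) (m : List (Int × Option Int)) (k : Nat)
    (hsome : ∀ i < k, ∃ c, (wcStep m)^[i] (some v) = some c)
    (hdist : ∀ i j, i < j → j < k → (wcStep m)^[i] (some v) ≠ (wcStep m)^[j] (some v)) :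
    k ≤ m.length + 1 := by
  classical
  set f : Nat → Option Int := fun i => (wcStep m)^[i] (some v) with hf
  have hinj : Set.InjOn f (Finset.range k) := by
    intro a ha b hb hab
    simp only [Finset.coe_range, Set.mem_Iio] at ha hb
    by_contra hne
    rcases Nat.lt_or_ge a b with h | h
    · exact hdist a b h hb hab
    · exact hdist b a (by omega) ha hab.symm
  have hmaps : ∀ i ∈ Finset.range k, f i ∈ ((wcS v m).map some).toFinset := by
    intro i hi
    simp only [Finset.mem_range] at hi
    obtain ⟨c, hc⟩ := hsome i hi
    simp only [hf, hc, List.mem_toFinset, List.mem_map]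
    exact ⟨c, wc_chain_mem v m i c hc, rfl⟩
  have hcard := Finset.card_le_card_of_injOn f hmaps hinj
  have h1 : (Finset.range k).card = k := Finset.card_range k
  have h2 : ((wcS v m).map some).toFinset.card ≤ ((wcS v m).map some).length :=
    List.toFinset_card_le _
  have h3 : ((wcS v m).map some).length = (m.filterMap Prod.snd).length + 1 := by
    simp [wcS]
  have h4 : (m.filterMap Prod.snd).length ≤ m.length := List.length_filterMap_le _ _
  omega

-- A's loop computes reachability of u along the chain, given the loop invariants
theorem wcA_iff (u v : Int) (m : List (Int × Option Int)) :
    ∀ (fuel k : Nat) (c : Int) (seen : PySem.Set Int),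
    (wcStep m)^[k] (some v) = some c →
    (∀ x : Int, x ∈ seen ↔ ∃ i < k, (wcStep m)^[i] (some v) = some x) →
    (∀ i < k, (wcStep m)^[i] (some v) ≠ some u) →
    (∀ i j, i < j → j < k → (wcStep m)^[i] (some v) ≠ (wcStep m)^[j] (some v)) →
    fuel + k = m.length + 2 →
    (wcA_loop u m fuel c seen = true ↔ ∃ j, (wcStep m)^[j] (some v) = some u) := by
  intro fuel
  induction fuel with
  | zero =>
    intro k c seen hc _hseen _hnu hdist hfuel
    exfalso
    have hsome : ∀ i < k, ∃ x, (wcStep m)^[i] (some v) = some x := by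
      intro i hi
      cases hx : (wcStep m)^[i] (some v) with
      | none =>
        have : (wcStep m)^[k] (some v) = none := by
          have : k = (k - i) + i := by omega
          rw [this, Function.iterate_add_apply, hx, wcStep_none]
        rw [hc] at this; exact absurd this (by simp)
      | some x => exact ⟨x, rfl⟩
    have := wc_pigeon v m k hsome hdist
    omega
  | succ fuel ih =>
    intro k c seen hc hseen hnu hdist hfuel
    show (if c = u then true
      else if PySem.Set.contains seen c then false
      else match PySem.Dict.getD (PySem.Dict.mk m) c none with
        | some nxt => wcA_loop u m fuel nxt (PySem.Set.add seen c)
        | none => false) = true ↔ _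
    by_cases hcu : c = u
    · simp only [hcu, if_true, true_iff]
      exact ⟨k, by rw [hc, hcu]⟩
    · simp only [hcu, if_false]
      by_cases hmem : c ∈ seen
      · have hct : PySem.Set.contains seen c = true := (PySem.Set.contains_iff seen c).2 hmem
        simp only [hct, if_true, Bool.false_eq_true, false_iff]
        rintro ⟨j, hj⟩
        obtain ⟨i, hik, hi⟩ := (hseen c).1 hmem
        have heq : (wcStep m)^[k] (some v) = (wcStep m)^[i] (some v) := by
          rw [hc, hi]
        obtain ⟨j', hj'k, hj'eq⟩ := wc_period m (some v) i k hik heq j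
        rw [hj] at hj'eq
        exact hnu j' hj'k hj'eq
      · have hct : PySem.Set.contains seen c = false := by
          cases h : PySem.Set.contains seen c
          · rfl
          · exact absurd ((PySem.Set.contains_iff seen c).1 h) hmem
        simp only [hct, Bool.false_eq_true, if_false]
        have hnext : (wcStep m)^[k + 1] (some v)
            = PySem.Dict.getD (PySem.Dict.mk m) c none := by
          rw [Function.iterate_succ_apply', hc]; rfl
        cases hg : PySem.Dict.getD (PySem.Dict.mk m) c none with
        | none =>
          simp only [Bool.false_eq_true, false_iff]
          rintro ⟨j, hj⟩
          by_cases hjk : j ≤ k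
          · rcases Nat.lt_or_ge j k with h | h
            · exact hnu j h hj
            · have : j = k := by omega
              rw [this, hc] at hj
              exact hcu (by injection hj)
          · rw [not_le] at hjk
            have : (wcStep m)^[j] (some v) = none := by
              have hd : j = (j - (k + 1)) + (k + 1) := by omega
              rw [hd, Function.iterate_add_apply, hnext, hg, wcStep_none]
            rw [hj] at this; exact absurd this (by simp)
        | some nxt =>
          refine ih (k + 1) nxt (PySem.Set.add seen c) ?_ ?_ ?_ ?_ (by omega)
          · rw [hnext, hg]
          · intro x
            rw [PySem.Set.mem_add]
            constructor
            · rintro (hx | rfl)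
              · obtain ⟨i, hik, hi⟩ := (hseen x).1 hx
                exact ⟨i, by omega, hi⟩
              · exact ⟨k, by omega, hc⟩
            · rintro ⟨i, hik, hi⟩
              rcases Nat.lt_or_ge i k with h | h
              · exact Or.inl ((hseen x).2 ⟨i, h, hi⟩)
              · have : i = k := by omega
                rw [this, hc] at hi
                exact Or.inr (by injection hi; omega)
          · intro i hik
            rcases Nat.lt_or_ge i k with h | h
            · exact hnu i h
            · have : i = k := by omega
              rw [this, hc]
              intro h'; exact hcu (by injection h')
          · intro i j hij hjk
            rcases Nat.lt_or_ge j k with h | h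
            · exact hdist i j hij h
            · have : j = k := by omega
              subst this
              rw [hc]
              intro h'
              exact hmem ((hseen c).2 ⟨i, hij, h'⟩)

-- the fold only enlarges the set
theorem wcB_fold_mono (l : List (Int × Option Int)) :
    ∀ (st : PySem.Set Int × Bool) (x : Int), x ∈ st.1 → x ∈ (l.foldl wcBstep st).1 := by
  induction l with
  | nil => intro st x hx; exact hx
  | cons p rest ih =>
    intro st x hx
    rw [List.foldl_cons]
    apply ih
    unfold wcBstep
    cases p.2 with
    | none => exact hx
    | some y =>
      dsimp only
      split_ifs with h
      · exact (PySem.Set.mem_add _ _ _).2 (Or.inl hx)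
      · exact hx

-- the 'changed' flag never resets to false
theorem wcB_flag_stays (l : List (Int × Option Int)) :
    ∀ (s : PySem.Set Int), (l.foldl wcBstep (s, true)).2 = true := by
  induction l with
  | nil => intro s; rfl
  | cons p rest ih =>
    intro s
    rw [List.foldl_cons]
    unfold wcBstep
    cases p.2 with
    | none => exact ih s
    | some y =>
      dsimp only
      split_ifs with h
      · exact ih _
      · exact ih s

-- an unchanged pass left the set alone and witnesses closure under predecessors
theorem wcB_pass_false (l : List (Int × Option Int)) :
    ∀ (s : PySem.Set Int), (l.foldl wcBstep (s, false)).2 = false →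
    (l.foldl wcBstep (s, false)).1 = s ∧
    ∀ p ∈ l, ∀ x, p.2 = some x → x ∈ s → p.1 ∈ s := by
  induction l with
  | nil => intro s _; exact ⟨rfl, by intro p hp; simp at hp⟩
  | cons p rest ih =>
    intro s hfalse
    rw [List.foldl_cons] at hfalse ⊢
    cases hp2 : p.2 with
    | none =>
      have hstep : wcBstep (s, false) p = (s, false) := by
        simp only [wcBstep, hp2]
      rw [hstep] at hfalse ⊢
      obtain ⟨h1, h2⟩ := ih s hfalse
      refine ⟨h1, ?_⟩
      intro q hq x hqx hx
      rcases List.mem_cons.1 hq with rfl | hq'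
      · rw [hp2] at hqx; exact absurd hqx (by simp)
      · exact h2 q hq' x hqx hx
    | some y =>
      by_cases hcond : (PySem.Set.contains s y && !PySem.Set.contains s p.1) = true
      · exfalso
        have hstep : wcBstep (s, false) p = (PySem.Set.add s p.1, true) := by
          simp only [wcBstep, hp2]; rw [if_pos hcond]
        rw [hstep] at hfalse
        rw [wcB_flag_stays rest _] at hfalse
        exact absurd hfalse (by simp)
      · have hstep : wcBstep (s, false) p = (s, false) := by
          simp only [wcBstep, hp2]; rw [if_neg hcond]
        rw [hstep] at hfalse ⊢
        obtain ⟨h1, h2⟩ := ih s hfalse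
        refine ⟨h1, ?_⟩
        intro q hq x hqx hx
        rcases List.mem_cons.1 hq with rfl | hq'
        · rw [hp2] at hqx
          have hxy : y = x := by injection hqx
          subst hxy
          have hcy : PySem.Set.contains s y = true := (PySem.Set.contains_iff s y).2 hx
          rw [Bool.and_eq_true, not_and] at hcond
          have hnot := hcond hcy
          have : PySem.Set.contains s q.1 = true := by
            cases h : PySem.Set.contains s q.1
            · exact absurd (by rw [h]; rfl : (!PySem.Set.contains s q.1) = true) hnot
            · rfl
          exact (PySem.Set.contains_iff s q.1).1 this
        · exact h2 q hq' x hqx hx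

-- a changing pass put some NEW key of the edge list into the set
theorem wcB_pass_newkey (l : List (Int × Option Int)) :
    ∀ (s : PySem.Set Int), (l.foldl wcBstep (s, false)).2 = true →
    ∃ k, k ∈ l.map Prod.fst ∧ k ∉ s ∧ k ∈ (l.foldl wcBstep (s, false)).1 := by
  induction l with
  | nil => intro s h; exact absurd h (by simp [List.foldl_nil])
  | cons p rest ih =>
    intro s htrue
    rw [List.foldl_cons] at htrue ⊢
    cases hp2 : p.2 with
    | none =>
      have hstep : wcBstep (s, false) p = (s, false) := by
        simp only [wcBstep, hp2]
      rw [hstep] at htrue ⊢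
      obtain ⟨k, hk1, hk2, hk3⟩ := ih s htrue
      exact ⟨k, by simp [hk1], hk2, hk3⟩
    | some y =>
      by_cases hcond : (PySem.Set.contains s y && !PySem.Set.contains s p.1) = true
      · have hstep : wcBstep (s, false) p = (PySem.Set.add s p.1, true) := by
          simp only [wcBstep, hp2]; rw [if_pos hcond]
        rw [hstep]
        refine ⟨p.1, by simp, ?_, ?_⟩
        · rw [Bool.and_eq_true] at hcond
          intro hmem
          have := (PySem.Set.contains_iff s p.1).2 hmem
          rw [this] at hcond
          simp at hcond
        · exact wcB_fold_mono rest _ p.1 ((PySem.Set.mem_add _ _ _).2 (Or.inr rfl))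
      · have hstep : wcBstep (s, false) p = (s, false) := by
          simp only [wcBstep, hp2]; rw [if_neg hcond]
        rw [hstep] at htrue ⊢
        obtain ⟨k, hk1, hk2, hk3⟩ := ih s htrue
        exact ⟨k, by simp [hk1], hk2, hk3⟩

-- filter-length monotonicity and strict decrease (pigeonhole for the pass counter)
theorem wc_filt_le (l : List Int) (p q : Int → Bool) (h : ∀ x, p x = true → q x = true) :
    (l.filter p).length ≤ (l.filter q).length := by
  induction l with
  | nil => simp
  | cons a rest ih =>
    cases hp : p a
    · cases hq : q a
      · simp [List.filter_cons, hp, hq, ih]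
      · simp only [List.filter_cons, hp, hq]
        simp only [Bool.false_eq_true, if_false, if_true, List.length_cons]
        omega
    · have hq := h a hp
      simp only [List.filter_cons, hp, hq, if_true, List.length_cons]
      omega

theorem wc_filt_lt (l : List Int) (p q : Int → Bool) (h : ∀ x, p x = true → q x = true)
    (k : Int) (hk : k ∈ l) (hqk : q k = true) (hpk : p k = false) :
    (l.filter p).length < (l.filter q).length := by
  induction l with
  | nil => simp at hk
  | cons a rest ih =>
    rcases List.mem_cons.1 hk with rfl | hk'
    · simp only [List.filter_cons, hpk, hqk, Bool.false_eq_true, if_false, if_true,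
        List.length_cons]
      have := wc_filt_le rest p q h
      omega
    · cases hp : p a
      · cases hq : q a
        · simpa [List.filter_cons, hp, hq] using ih hk'
        · simp only [List.filter_cons, hp, hq, Bool.false_eq_true, if_false, if_true,
            List.length_cons]
          have := ih hk'
          omega
      · have hq := h a hp
        simp only [List.filter_cons, hp, hq, if_true, List.length_cons]
        have := ih hk'
        omega

-- the saturation only enlarges the set
theorem wcB_sat_mono (m : List (Int × Option Int)) :
    ∀ (fuel : Nat) (anc : PySem.Set Int) (x : Int), x ∈ anc → x ∈ wcBsat m fuel anc := by
  intro fuel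
  induction fuel with
  | zero => intro anc x hx; exact hx
  | succ fuel ih =>
    intro anc x hx
    show x ∈ (let r := wcBpass m anc; if r.2 then wcBsat m fuel r.1 else anc)
    by_cases h : (wcBpass m anc).2
    · simp only [h, if_true]
      exact ih _ x (wcB_fold_mono m _ x hx)
    · simp only [h, if_false]
      exact hx

-- with enough fuel the saturation reaches a fixpoint (each changing pass eats a key)
theorem wcB_sat_fix (m : List (Int × Option Int)) :
    ∀ (fuel : Nat) (anc : PySem.Set Int),
    ((m.map Prod.fst).filter (fun k => !PySem.Set.contains anc k)).length < fuel →
    (m.foldl wcBstep (wcBsat m fuel anc, false)).2 = false := by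
  intro fuel
  induction fuel with
  | zero => intro anc h; omega
  | succ fuel ih =>
    intro anc hcount
    show (m.foldl wcBstep
      ((let r := wcBpass m anc; if r.2 then wcBsat m fuel r.1 else anc), false)).2 = false
    by_cases h : (wcBpass m anc).2
    · simp only [h, if_true]
      apply ih
      obtain ⟨k, hk1, hk2, hk3⟩ := wcB_pass_newkey m anc h
      have hmono : ∀ x, (!PySem.Set.contains (wcBpass m anc).1 x) = true →
          (!PySem.Set.contains anc x) = true := by
        intro x hx
        simp only [Bool.not_eq_true'] at hx ⊢
        cases hc : PySem.Set.contains anc x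
        · rfl
        · exfalso
          have h1 := wcB_fold_mono m (anc, false) x ((PySem.Set.contains_iff anc x).1 hc)
          have h2 := (PySem.Set.contains_iff _ x).2 h1
          unfold wcBpass at hx
          rw [hx] at h2
          exact absurd h2 (by simp)
      have hlt := wc_filt_lt (m.map Prod.fst)
        (fun k => !PySem.Set.contains (wcBpass m anc).1 k)
        (fun k => !PySem.Set.contains anc k) hmono k hk1
        (by simp only [Bool.not_eq_true']
            cases hc : PySem.Set.contains anc k
            · rfl
            · exact absurd ((PySem.Set.contains_iff anc k).1 hc) hk2)
        (by unfold wcBpass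
            rw [Bool.not_eq_false']
            exact (PySem.Set.contains_iff _ k).2 hk3)
      omega
    · have h' : (wcBpass m anc).2 = false := by
        cases hh : (wcBpass m anc).2
        · rfl
        · exact absurd hh h
      show (m.foldl wcBstep
        ((if (wcBpass m anc).2 then wcBsat m fuel (wcBpass m anc).1 else anc), false)).2 = false
      rw [h']
      simp only [Bool.false_eq_true, if_false]
      unfold wcBpass at h'
      exact h'

-- soundness: everything the pass adds reaches u (needs duplicate-free keys)
theorem wcB_fold_sound (u : Int) (m : List (Int × Option Int))
    (hnd : (m.map Prod.fst).Nodup) :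
    ∀ (l : List (Int × Option Int)), (∀ p ∈ l, p ∈ m) →
    ∀ (st : PySem.Set Int × Bool), (∀ z ∈ st.1, wcReach u m z) →
    ∀ z ∈ (l.foldl wcBstep st).1, wcReach u m z := by
  intro l
  induction l with
  | nil => intro _ st hst z hz; exact hst z hz
  | cons p rest ih =>
    intro hsub st hst
    rw [List.foldl_cons]
    apply ih (fun q hq => hsub q (List.mem_cons_of_mem _ hq))
    intro z hz
    unfold wcBstep at hz
    cases hp2 : p.2 with
    | none => rw [hp2] at hz; exact hst z hz
    | some y =>
      rw [hp2] at hz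
      dsimp only at hz
      split_ifs at hz with hcond
      · rcases (PySem.Set.mem_add _ _ _).1 hz with hz' | hzeq
        · exact hst z hz'
        · rw [Bool.and_eq_true] at hcond
          have hy : y ∈ st.1 := (PySem.Set.contains_iff _ y).1 hcond.1
          obtain ⟨j, hj⟩ := hst y hy
          have hpm : p ∈ m := hsub p List.mem_cons_self
          have hpair : (p.1, some y) ∈ m := by rw [← hp2]; exact hpm
          have hget := wc_getD_of_mem m p.1 (some y) hnd hpair
          refine ⟨j + 1, ?_⟩
          rw [Function.iterate_succ_apply, hzeq]
          have hstepeq : wcStep m (some p.1) = some y := by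
            rw [show wcStep m (some p.1)
              = PySem.Dict.getD (PySem.Dict.mk m) p.1 none from rfl]
            exact hget
          rw [hstepeq]
          exact hj
      · exact hst z hz

-- soundness of the whole saturation
theorem wcB_sat_sound (u : Int) (m : List (Int × Option Int))
    (hnd : (m.map Prod.fst).Nodup) :
    ∀ (fuel : Nat) (anc : PySem.Set Int), (∀ z ∈ anc, wcReach u m z) →
    ∀ z ∈ wcBsat m fuel anc, wcReach u m z := by
  intro fuel
  induction fuel with
  | zero => intro anc h z hz; exact h z hz
  | succ fuel ih =>
    intro anc h z hz
    have hz' : z ∈ (let r := wcBpass m anc; if r.2 then wcBsat m fuel r.1 else anc) := hz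
    by_cases hc : (wcBpass m anc).2
    · simp only [hc, if_true] at hz'
      exact ih _ (wcB_fold_sound u m hnd m (fun _ hq => hq) (anc, false) h) z hz'
    · simp only [hc, if_false] at hz'
      exact h z hz'

-- completeness: every node that reaches u lies in a predecessor-closed set containing u
theorem wcB_complete (u : Int) (m : List (Int × Option Int)) (F : PySem.Set Int)
    (hu : u ∈ F) (hclosed : ∀ p ∈ m, ∀ x, p.2 = some x → x ∈ F → p.1 ∈ F) :
    ∀ (j : Nat) (c : Int), (wcStep m)^[j] (some c) = some u → c ∈ F := by
  intro j
  induction j with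
  | zero => intro c hc; simp at hc; rw [hc]; exact hu
  | succ j ih =>
    intro c hc
    rw [Function.iterate_succ_apply] at hc
    cases hg : wcStep m (some c) with
    | none => rw [hg, wcStep_none] at hc; exact absurd hc (by simp)
    | some x =>
      rw [hg] at hc
      have hxF : x ∈ F := ih x hc
      have hget : PySem.Dict.getD (PySem.Dict.mk m) c none = some x := hg
      have hpair : (c, some x) ∈ m := wc_getD_pair_mem m c x hget
      exact hclosed (c, some x) hpair x rfl hxF

-- ===== VERDICT (by name: the statement is the Claim_ definition above) =====
theorem would_cycle_py_spec : Claim_equal_would_cycle_py := by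
  intro u v m _hdom hpre
  unfold Pre_would_cycle_py at hpre
  unfold Spec_would_cycle_py would_cycle_py would_cycle_py_alt
  have hA := wcA_iff u v m (m.length + 2) 0 v PySem.Set.empty
    (by simp) (by simp [PySem.Set.empty]) (by omega) (by omega) (by omega)
  set F : PySem.Set Int := wcBsat m (m.length + 1) (PySem.Set.ofList [u]) with hF
  have hcount : ((m.map Prod.fst).filter
      (fun k => !PySem.Set.contains (PySem.Set.ofList [u]) k)).length < m.length + 1 := by
    have h1 := List.length_filter_le
      (fun k => !PySem.Set.contains (PySem.Set.ofList [u]) k) (m.map Prod.fst)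
    have h2 : (m.map Prod.fst).length = m.length := List.length_map _
    omega
  have hfix := wcB_sat_fix m (m.length + 1) (PySem.Set.ofList [u]) hcount
  have hclosed := (wcB_pass_false m F hfix).2
  have hu : u ∈ F :=
    wcB_sat_mono m (m.length + 1) _ u ((PySem.Set.mem_ofList _ _).2 (by simp))
  have hBiff : v ∈ F ↔ ∃ j, (wcStep m)^[j] (some v) = some u := by
    constructor
    · intro hv
      exact wcB_sat_sound u m hpre (m.length + 1) (PySem.Set.ofList [u])
        (by intro z hz
            have : z = u := by simpa using (PySem.Set.mem_ofList _ _).1 hz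
            exact ⟨0, by rw [this]; rfl⟩) v hv
    · rintro ⟨j, hj⟩
      exact wcB_complete u m F hu hclosed j v hj
  rw [Bool.eq_iff_iff, hA, PySem.Set.contains_iff]
  exact hBiff.symm
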